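-- pv_equiv track=rewrite | github.com/Ycreak/MGAIA | Game/answer_validation.py | getNameVariants
-- ===== SOURCE A (Python) =====
-- def getNameVariants(answer):
--     variants = []
--
--     index = len(answer.split()) - 2 # Not the surname
--     variants.append(answer)
--     while index >= 0:
--         name = answer.split()
--         name[index] = name[index][0] + '.'
--         variants.append(' '.join(name))
--         index -= 1
--         answer = ' '.join(name)
--     return variants
-- ===== SOURCE B (Python) =====
-- def getNameVariants(answer):
--     words = answer.split()
--     n = len(words)
--     variants = [answer]
--     for k in range(1, n):
--         variants.append(' '.join(
--             w if i < n - 1 - k or i == n - 1 else w[0] + '.'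
--             for i, w in enumerate(words)))
--     return variants
-- ===== Notes on version B (the rewrite author's own statement) =====
-- stated objective: simpler
-- what changed: B splits the answer once and constructs each variant statelessly from the original tokens (abbreviating indices n-1-k..n-2 for the k-th variant), instead of A's accumulator that mutates, re-joins and re-splits the answer string on every iteration.
import Mathlib
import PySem

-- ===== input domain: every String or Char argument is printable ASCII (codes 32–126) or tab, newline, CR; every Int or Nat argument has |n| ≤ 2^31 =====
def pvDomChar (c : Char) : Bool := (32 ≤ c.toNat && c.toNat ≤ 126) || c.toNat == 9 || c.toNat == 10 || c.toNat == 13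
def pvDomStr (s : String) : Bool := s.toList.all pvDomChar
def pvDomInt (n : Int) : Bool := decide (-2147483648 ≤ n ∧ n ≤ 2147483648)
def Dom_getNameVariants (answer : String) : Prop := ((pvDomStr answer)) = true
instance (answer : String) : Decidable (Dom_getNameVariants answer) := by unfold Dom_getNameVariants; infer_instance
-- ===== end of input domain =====

-- B builds each abbreviated-name variant statelessly from the tokens of the original answer instead
-- of A's mutate-join-and-resplit accumulator; objective: simpler. Both programs are total.

-- shared micro-helper: the expression  w[0] + '.'  occurring literally in both Pythons
-- (the .getD defaults here and in the A-loop are never reached: split() only produces nonempty words)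
def pvAbbrev (w : String) : String :=
  String.ofList (((PySem.List.pyGet? w.toList 0).getD ' ') :: ['.'])

-- ===== PORT A =====
-- A's while-loop decrements index from len(answer.split())-2 down to 0; ported as recursion on
-- fuel = index + 1 (fuel = len(split)-1 at entry; for len ≤ 1 Python's index < 0 and fuel = 0: no iterations)
def getNameVariantsLoop (answer : String) (fuel : Nat) (variants : List String) : List String :=
  match fuel with
  | 0 => variants
  | m + 1 =>
    let name := PySem.Str.split₀ answer
    let name := name.set m (pvAbbrev ((PySem.List.pyGet? name (m : Int)).getD ""))
    let joined := PySem.Str.join " " name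
    getNameVariantsLoop joined m (variants ++ [joined])

def getNameVariants (answer : String) : List String :=
  getNameVariantsLoop answer ((PySem.Str.split₀ answer).length - 1) [answer]

-- ===== PORT B =====
-- literal transliteration of Source B: split once, then for k in range(1, n) build the k-th variant
-- directly from the original words by abbreviating indices with n-1-k ≤ i < n-1
def getNameVariants_alt (answer : String) : List String :=
  let words := PySem.Str.split₀ answer
  let n : Int := (words.length : Int)
  answer :: (PySem.List.pyRange 1 n).map (fun k =>
    PySem.Str.join " " ((PySem.List.enumerate words 0).map (fun p =>
      if p.1 < n - 1 - k ∨ p.1 = n - 1 then p.2 else pvAbbrev p.2)))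

-- ===== PRECONDITION & SPEC =====
def Spec_getNameVariants (answer : String) (out : List String) : Prop := out = getNameVariants_alt answer
instance (answer : String) (out : List String) : Decidable (Spec_getNameVariants answer out) := by unfold Spec_getNameVariants; infer_instance

-- ===== CLAIM (what is proved, stated in full; the proofs are below) =====
def Claim_equal_getNameVariants : Prop := ∀ (answer : String), Dom_getNameVariants answer → Spec_getNameVariants answer (getNameVariants answer)

-- ===== LEMMAS AND PROOFS =====

-- a word is "good" when it is nonempty and contains no Python whitespace (every word split() yields is)
def pvGood (w : String) : Prop :=
  w.toList ≠ [] ∧ ∀ c ∈ w.toList, PySem.Chars.isspace c = false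

-- the word list of variant k, built statelessly from the original words (B's inner expression)
def pvVariantWords (ws : List String) (k : Int) : List String :=
  (PySem.List.enumerate ws 0).map (fun p =>
    if p.1 < (ws.length : Int) - 1 - k ∨ p.1 = (ws.length : Int) - 1 then p.2 else pvAbbrev p.2)

theorem pvGo_block (w : List Char) (hw : ∀ c ∈ w, PySem.Chars.isspace c = false) :
    ∀ rest cur acc, PySem.Chars.split₀.go (w ++ rest) cur acc
      = PySem.Chars.split₀.go rest (w.reverse ++ cur) acc := by
  induction w with
  | nil => simp
  | cons c w ih =>
    intro rest cur acc
    have hc : PySem.Chars.isspace c = false := hw c (by simp)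
    rw [List.cons_append, PySem.Chars.split₀.go, hc]
    simp only [Bool.false_eq_true, if_false]
    rw [ih (fun d hd => hw d (by simp [hd])) rest (c :: cur) acc]
    simp

theorem pvGo_join (ws : List (List Char))
    (h : ∀ w ∈ ws, w ≠ [] ∧ ∀ c ∈ w, PySem.Chars.isspace c = false) :
    ∀ acc, PySem.Chars.split₀.go (PySem.Chars.join [' '] ws) [] acc = acc.reverse ++ ws := by
  induction ws with
  | nil => intro acc; rw [PySem.Chars.join_nil, PySem.Chars.split₀.go]; simp
  | cons w tail ih =>
    intro acc
    obtain ⟨hw1, hw2⟩ := h w (by simp)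
    cases tail with
    | nil =>
      rw [PySem.Chars.join_singleton]
      have := pvGo_block w hw2 [] [] acc
      simp only [List.append_nil] at this
      rw [this, PySem.Chars.split₀.go]
      simp [List.isEmpty_iff, hw1]
    | cons w' t =>
      rw [PySem.Chars.join_cons_cons]
      rw [show w ++ [' '] ++ PySem.Chars.join [' '] (w' :: t)
            = w ++ (' ' :: PySem.Chars.join [' '] (w' :: t)) by simp]
      rw [pvGo_block w hw2]
      rw [PySem.Chars.split₀.go]
      have hsp : PySem.Chars.isspace ' ' = true := by decide
      rw [hsp]
      simp only [if_true, List.append_nil]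
      rw [if_neg (by simpa [List.isEmpty_iff] using hw1)]
      rw [List.reverse_reverse]
      rw [ih (fun v hv => h v (by simp [hv])) (w :: acc)]
      simp

theorem pvGo_good (s : List Char) :
    ∀ cur acc, (∀ c ∈ cur, PySem.Chars.isspace c = false) →
      (∀ w ∈ acc, w ≠ [] ∧ ∀ c ∈ w, PySem.Chars.isspace c = false) →
      ∀ w ∈ PySem.Chars.split₀.go s cur acc, w ≠ [] ∧ ∀ c ∈ w, PySem.Chars.isspace c = false := by
  induction s with
  | nil =>
    intro cur acc hcur hacc w hw
    rw [PySem.Chars.split₀.go] at hw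
    split at hw
    · exact hacc w (by simpa using hw)
    · rename_i hne
      simp only [List.mem_reverse, List.mem_cons] at hw
      rcases hw with hw | hw
      · subst hw
        constructor
        · simpa [List.isEmpty_iff] using hne
        · intro c hc; exact hcur c (by simpa using hc)
      · exact hacc w hw
  | cons c rest ih =>
    intro cur acc hcur hacc w hw
    rw [PySem.Chars.split₀.go] at hw
    by_cases hc : PySem.Chars.isspace c = true
    · rw [hc] at hw; simp only [if_true] at hw
      split at hw
      · exact ih [] acc (by simp) hacc w hw
      · rename_i hne
        refine ih [] _ (by simp) ?_ w hw
        intro v hv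
        rcases List.mem_cons.mp hv with hv | hv
        · subst hv
          exact ⟨by simpa [List.isEmpty_iff] using hne,
                 fun d hd => hcur d (by simpa using hd)⟩
        · exact hacc v hv
    · rw [Bool.not_eq_true] at hc
      rw [hc] at hw; simp only [Bool.false_eq_true, if_false] at hw
      refine ih (c :: cur) acc ?_ hacc w hw
      intro d hd
      rcases List.mem_cons.mp hd with hd | hd
      · subst hd; exact hc
      · exact hcur d hd

theorem pvSplit_good (s : String) : ∀ w ∈ PySem.Str.split₀ s, pvGood w := by
  intro w hw
  have h1 : w.toList ∈ PySem.Chars.split₀ s.toList := by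
    rw [← PySem.Str.split₀_map_toList]
    exact List.mem_map_of_mem hw
  have h2 := pvGo_good s.toList [] [] (by simp) (by simp) w.toList (by
    simpa [PySem.Chars.split₀] using h1)
  exact h2

theorem pvJoin_split (parts : List String) (h : ∀ w ∈ parts, pvGood w) :
    PySem.Str.split₀ (PySem.Str.join " " parts) = parts := by
  have key : (PySem.Str.split₀ (PySem.Str.join " " parts)).map String.toList
      = parts.map String.toList := by
    rw [PySem.Str.split₀_map_toList, PySem.Str.toList_join]
    have hsep : (" " : String).toList = [' '] := by decide
    rw [hsep]
    show PySem.Chars.split₀.go _ [] [] = _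
    rw [pvGo_join _ (by
      intro w hw
      obtain ⟨v, hv, rfl⟩ := List.mem_map.mp hw
      exact (h v hv))]
    simp
  exact List.map_injective_iff.mpr (fun a b hab => String.toList_inj.mp hab) key

theorem pvAbbrev_good (w : String) (hw : pvGood w) : pvGood (pvAbbrev w) := by
  obtain ⟨h1, h2⟩ := hw
  obtain ⟨c, t, hct⟩ := List.exists_cons_of_ne_nil h1
  constructor
  · simp [pvAbbrev, String.toList_ofList]
  · intro d hd
    simp only [pvAbbrev, String.toList_ofList, List.mem_cons] at hd
    rcases hd with hd | hd
    · subst hd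
      rw [hct]
      have : PySem.List.pyGet? (c :: t) 0 = some c := by
        exact PySem.List.pyGet?_natCast (c :: t) 0
      rw [this]
      exact h2 c (by simp [hct])
    · simp at hd
      subst hd
      decide

theorem pvVariantWords_getElem? (ws : List String) (k : Int) (i : Nat) :
    (pvVariantWords ws k)[i]? = ws[i]?.map (fun w =>
      if (i : Int) < (ws.length : Int) - 1 - k ∨ (i : Int) = (ws.length : Int) - 1
      then w else pvAbbrev w) := by
  simp only [pvVariantWords, List.getElem?_map, PySem.List.getElem?_enumerate]
  cases ws[i]? <;> simp

theorem pvVariantWords_zero (ws : List String) : pvVariantWords ws 0 = ws := by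
  apply List.ext_getElem?
  intro i
  rw [pvVariantWords_getElem?]
  cases h : ws[i]? with
  | none => rfl
  | some w =>
    have hi : i < ws.length := (List.getElem?_eq_some_iff.mp h).1
    simp only [Option.map_some]
    rw [if_pos (by omega)]

theorem pvVariantWords_good (ws : List String) (hws : ∀ w ∈ ws, pvGood w) (k : Int) :
    ∀ w ∈ pvVariantWords ws k, pvGood w := by
  intro w hw
  obtain ⟨i, hi⟩ := List.mem_iff_getElem?.mp hw
  rw [pvVariantWords_getElem?] at hi
  cases h : ws[i]? with
  | none => rw [h] at hi; simp at hi
  | some v =>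
    rw [h] at hi
    simp only [Option.map_some, Option.some_inj] at hi
    have hv : pvGood v := hws v (List.mem_of_getElem? h)
    subst hi
    split
    · exact hv
    · exact pvAbbrev_good v hv

theorem pvStep (ws : List String) (j : Nat) (hj : j + 2 ≤ ws.length) :
    (pvVariantWords ws (j : Int)).set (ws.length - 2 - j)
        (pvAbbrev ((PySem.List.pyGet? (pvVariantWords ws (j : Int))
          ((ws.length - 2 - j : Nat) : Int)).getD ""))
      = pvVariantWords ws ((j : Int) + 1) := by
  apply List.ext_getElem?
  intro i
  rw [List.getElem?_set]
  by_cases hit : i = ws.length - 2 - j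
  · subst hit
    rw [if_pos rfl]
    have hlen : ws.length - 2 - j < (pvVariantWords ws (j : Int)).length := by
      simp only [pvVariantWords, List.length_map, PySem.List.enumerate_eq_zipIdx_map,
        List.length_zipIdx]
      omega
    rw [if_pos hlen]
    have hv : ws[ws.length - 2 - j]? = some (ws[ws.length - 2 - j]'(by omega)) :=
      List.getElem?_eq_getElem (by omega)
    rw [PySem.List.pyGet?_natCast, pvVariantWords_getElem?, hv]
    have hcast : ((ws.length - 2 - j : Nat) : Int) = (ws.length : Int) - 2 - (j : Int) := by
      omega
    rw [pvVariantWords_getElem?, hv]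
    simp only [Option.map_some, Option.getD_some, Option.some_inj]
    rw [if_pos (by omega), if_neg (by omega)]
  · rw [if_neg (fun hh => hit hh.symm)]
    rw [pvVariantWords_getElem?, pvVariantWords_getElem?]
    cases h : ws[i]? with
    | none => rfl
    | some v =>
      have hi : i < ws.length := (List.getElem?_eq_some_iff.mp h).1
      simp only [Option.map_some, Option.some_inj]
      by_cases hcond : (i : Int) < (ws.length : Int) - 1 - (j : Int) ∨ (i : Int) = (ws.length : Int) - 1
      · rw [if_pos hcond, if_pos (by omega)]
      · rw [if_neg hcond, if_neg (by omega)]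

theorem pvLoop (ws : List String) (hws : ∀ w ∈ ws, pvGood w) :
    ∀ (f : Nat) (a : String) (variants : List String), f + 1 ≤ ws.length →
      PySem.Str.split₀ a = pvVariantWords ws ((ws.length - 1 - f : Nat) : Int) →
      getNameVariantsLoop a f variants
        = variants ++ (List.range f).map (fun t =>
            PySem.Str.join " " (pvVariantWords ws ((ws.length - f + t : Nat) : Int))) := by
  intro f
  induction f with
  | zero => intro a variants _ _; simp [getNameVariantsLoop]
  | succ m ih =>
    intro a variants hf ha
    simp only [getNameVariantsLoop]
    rw [ha]
    have hstep := pvStep ws (ws.length - 1 - (m+1)) (by omega)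
    rw [show ws.length - 2 - (ws.length - 1 - (m+1)) = m from by omega] at hstep
    rw [hstep]
    have hnext : (((ws.length - 1 - (m+1) : Nat) : Int) + 1) = ((ws.length - 1 - m : Nat) : Int) := by
      omega
    rw [hnext]
    rw [ih _ _ (by omega) (pvJoin_split _ (pvVariantWords_good ws hws _))]
    rw [List.range_succ_eq_map]
    simp only [List.map_cons, List.map_map]
    rw [show ((ws.length - (m+1) + 0 : Nat) : Int) = ((ws.length - 1 - m : Nat) : Int) by omega]
    rw [List.append_assoc]
    apply congrArg
    rw [List.singleton_append]
    congr 1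
    apply List.map_congr_left
    intro t ht
    simp only [Function.comp_apply]
    congr 2
    omega

-- ===== VERDICT (by name: the statement is the Claim_ definition above) =====
theorem getNameVariants_spec : Claim_equal_getNameVariants := by
  intro answer _
  unfold Spec_getNameVariants
  have halt : getNameVariants_alt answer
      = answer :: (PySem.List.pyRange 1 ((PySem.Str.split₀ answer).length : Int)).map
          (fun k => PySem.Str.join " " (pvVariantWords (PySem.Str.split₀ answer) k)) := rfl
  rw [halt]
  unfold getNameVariants
  rcases Nat.eq_zero_or_pos (PySem.Str.split₀ answer).length with hn | hn
  · rw [hn]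
    rw [PySem.List.pyRange_one_eq_nil (by omega)]
    simp [getNameVariantsLoop]
  · rw [pvLoop (PySem.Str.split₀ answer) (pvSplit_good answer) _ answer [answer] (by omega)
      (by rw [show (((PySem.Str.split₀ answer).length - 1 - ((PySem.Str.split₀ answer).length - 1) : Nat) : Int) = 0 from by omega, pvVariantWords_zero])]
    rw [PySem.List.pyRange_one]
    rw [show (((PySem.Str.split₀ answer).length : Int) - 1).toNat = (PySem.Str.split₀ answer).length - 1 from by omega]
    rw [List.map_map, List.singleton_append]
    congr 1
    apply List.map_congr_left
    intro t ht
    simp only [Function.comp_apply]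
    congr 2
    omega
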